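-- pv_equiv track=rewrite | github.com/NeonClary/CCAI-Demo-FEAT_Config | multi_llm_chatbot_backend/app/models/persona.py | _extract_heading_blocks
-- ===== SOURCE A (Python) =====
-- from typing import Dict, List, Optional
--
-- def _extract_heading_blocks(lines: List[str]) -> Dict[str, List[str]]:
--     """Extract content lines under each expected ATX heading.
--
--     :param lines: Source lines.
--     :returns:     Mapping of heading name to its content lines.
--     """
--     sections: Dict[str, List[str]] = {"Thought": [], "What to do": [], "Next step": []}
--     current: Optional[str] = None
--     for l in lines:
--         if l.strip().lower().startswith("### thought"):
--             current = "Thought"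
--             continue
--         if l.strip().lower().startswith("### what to do"):
--             current = "What to do"
--             continue
--         if l.strip().lower().startswith("### next step"):
--             current = "Next step"
--             continue
--         if current:
--             sections[current].append(l)
--     return sections
-- ===== SOURCE B (Python) =====
-- def _extract_heading_blocks(lines):
--     """Extract content lines under each expected ATX heading (blockwise)."""
--     sections = {"Thought": [], "What to do": [], "Next step": []}
--
--     def classify(l):
--         s = l.strip().lower()
--         if s.startswith("### thought"):
--             return "Thought"
--         if s.startswith("### what to do"):
--             return "What to do"
--         if s.startswith("### next step"):
--             return "Next step"
--         return None
--
--     i, n = 0, len(lines)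
--     while i < n:
--         name = classify(lines[i])
--         i += 1
--         if name is None:
--             continue
--         start = i
--         while i < n and classify(lines[i]) is None:
--             i += 1
--         sections[name].extend(lines[start:i])
--     return sections
-- ===== Notes on version B (the rewrite author's own statement) =====
-- stated objective: alternative
-- what changed: Replaced A's single-pass state machine (a 'current' section variable with per-line dict appends) by a blockwise scan: find each heading, take the whole run of following non-heading lines at once, and extend that section with the slice.
import Mathlib
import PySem

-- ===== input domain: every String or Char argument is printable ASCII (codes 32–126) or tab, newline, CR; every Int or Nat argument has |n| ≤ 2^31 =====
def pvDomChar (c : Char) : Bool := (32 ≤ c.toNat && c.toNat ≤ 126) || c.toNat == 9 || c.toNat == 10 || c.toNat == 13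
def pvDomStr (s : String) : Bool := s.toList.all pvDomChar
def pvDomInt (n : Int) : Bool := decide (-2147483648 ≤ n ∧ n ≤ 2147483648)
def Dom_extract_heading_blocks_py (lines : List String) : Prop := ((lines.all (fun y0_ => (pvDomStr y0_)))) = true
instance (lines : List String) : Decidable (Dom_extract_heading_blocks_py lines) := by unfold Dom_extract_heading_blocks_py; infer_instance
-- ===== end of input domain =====

-- B replaces A's per-line `current`-state machine by a blockwise scan (heading, then the whole
-- following run of non-heading lines at once); objective: alternative decomposition, same cost.
-- The Python returns a dict; per the type convention both ports return its items as an assoc list.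

-- ===== PORT A =====
-- initial dict literal {"Thought": [], "What to do": [], "Next step": []} (shared by both sources)
def pvInit : PySem.Dict String (List String) :=
  PySem.Dict.ofList [("Thought", []), ("What to do", []), ("Next step", [])]

-- one iteration of A's for-loop over state (sections, current); `if current:` is truthy iff
-- current is not None here, since the only stored strings are the three nonempty names
def pvStepA (st : PySem.Dict String (List String) × Option String) (l : String) :
    PySem.Dict String (List String) × Option String :=
  let s := PySem.Str.lower (PySem.Str.strip l)
  if PySem.Str.startswith s "### thought" then (st.1, some "Thought")
  else if PySem.Str.startswith s "### what to do" then (st.1, some "What to do")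
  else if PySem.Str.startswith s "### next step" then (st.1, some "Next step")
  else
    match st.2 with
    | some c => (st.1.modify c [] (fun v => v ++ [l]), st.2)
    | none => st

def extract_heading_blocks_py (lines : List String) : List (String × List String) :=
  (lines.foldl pvStepA (pvInit, none)).1.items

-- ===== PORT B =====
-- Source B's classify helper
def pvClassify (l : String) : Option String :=
  let s := PySem.Str.lower (PySem.Str.strip l)
  if PySem.Str.startswith s "### thought" then some "Thought"
  else if PySem.Str.startswith s "### what to do" then some "What to do"
  else if PySem.Str.startswith s "### next step" then some "Next step"
  else none

-- Source B's outer while-loop over the remaining suffix, as structural recursion on a fuel bound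
-- (= the number of remaining iterations, at most the list length, so fuel never runs out);
-- the inner index scan `while i < n and classify(lines[i]) is None` plus the slice
-- lines[start:i] is exactly takeWhile/dropWhile of the non-heading run on that suffix
def pvGoB (d : PySem.Dict String (List String)) :
    Nat → List String → PySem.Dict String (List String)
  | _, [] => d
  | 0, _ => d
  | fuel + 1, l :: rest =>
    match pvClassify l with
    | none => pvGoB d fuel rest
    | some name =>
        pvGoB (d.modify name [] (fun v => v ++ rest.takeWhile (fun x => (pvClassify x).isNone)))
          fuel (rest.dropWhile (fun x => (pvClassify x).isNone))

def extract_heading_blocks_py_alt (lines : List String) : List (String × List String) :=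
  (pvGoB pvInit lines.length lines).items

-- ===== PRECONDITION & SPEC =====
def Spec_extract_heading_blocks_py (lines : List String) (out : List (String × List String)) : Prop := out = extract_heading_blocks_py_alt lines
instance (lines : List String) (out : List (String × List String)) : Decidable (Spec_extract_heading_blocks_py lines out) := by unfold Spec_extract_heading_blocks_py; infer_instance

-- ===== CLAIM (what is proved, stated in full; the proofs are below) =====
def Claim_equal_extract_heading_blocks_py : Prop := ∀ (lines : List String), Dom_extract_heading_blocks_py lines → Spec_extract_heading_blocks_py lines (extract_heading_blocks_py lines)

-- ===== LEMMAS AND PROOFS =====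

-- the three section names, in insertion order (= pvInit.keys)
def pvK0 : List String := ["Thought", "What to do", "Next step"]

-- reference: the (section, line) pairs produced while scanning with a current section
def pvBodies : Option String → List String → List (String × String)
  | _, [] => []
  | cur, l :: ls =>
    match pvClassify l with
    | some n => pvBodies (some n) ls
    | none =>
      match cur with
      | some c => (c, l) :: pvBodies (some c) ls
      | none => pvBodies none ls

def pvContent (c : String) (cur : Option String) (ls : List String) : List String :=
  ((pvBodies cur ls).filter (fun p => p.1 == c)).map (·.2)

theorem pvStepA_eq (st : PySem.Dict String (List String) × Option String) (l : String) :
    pvStepA st l =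
      match pvClassify l with
      | some n => (st.1, some n)
      | none =>
        match st.2 with
        | some c => (st.1.modify c [] (fun v => v ++ [l]), st.2)
        | none => st := by
  simp only [pvStepA, pvClassify]
  split_ifs <;> rfl

theorem pvClassify_mem (l : String) (n : String) (h : pvClassify l = some n) : n ∈ pvK0 := by
  simp only [pvClassify] at h
  split_ifs at h <;> simp_all [pvK0]

theorem pvGoB_nil (d : PySem.Dict String (List String)) (fuel : Nat) : pvGoB d fuel [] = d := by
  cases fuel <;> rfl

theorem foldA_getD (ls : List String) (d : PySem.Dict String (List String)) (cur : Option String)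
    (c : String) :
    ((ls.foldl pvStepA (d, cur)).1).getD c [] = d.getD c [] ++ pvContent c cur ls := by
  induction ls generalizing d cur with
  | nil => simp [pvContent, pvBodies]
  | cons l ls ih =>
    rw [List.foldl_cons, pvStepA_eq]
    cases h : pvClassify l with
    | some n =>
      simp only [ih]
      simp [pvContent, pvBodies, h]
    | none =>
      cases cur with
      | none =>
        simp only [ih]
        simp [pvContent, pvBodies, h]
      | some cc =>
        simp only [ih]
        simp only [pvContent, pvBodies, h]
        rw [PySem.Dict.getD_modify]
        by_cases hc : c = cc
        · subst hc; simp [List.append_assoc]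
        · simp [hc, Ne.symm hc]

theorem pvBodies_append_none (xs ys : List String) (name : String)
    (hx : ∀ x ∈ xs, pvClassify x = none) :
    pvBodies (some name) (xs ++ ys) =
      xs.map (fun x => (name, x)) ++ pvBodies (some name) ys := by
  induction xs with
  | nil => simp
  | cons x xs ih =>
    have hx0 : pvClassify x = none := hx x (by simp)
    simp only [List.cons_append, pvBodies, hx0]
    simp [ih fun a ha => hx a (by simp [ha])]

theorem pvBodies_heading_head (ls : List String) (cur cur' : Option String)
    (h : ls = [] ∨ ∃ hd tl, ls = hd :: tl ∧ (pvClassify hd).isSome) :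
    pvBodies cur ls = pvBodies cur' ls := by
  rcases h with h | ⟨hd, tl, rfl, hs⟩
  · subst h; rfl
  · rcases Option.isSome_iff_exists.mp hs with ⟨n, hn⟩
    simp [pvBodies, hn]

theorem goB_getD (fuel : Nat) : ∀ (ls : List String), ls.length ≤ fuel →
    ∀ (d : PySem.Dict String (List String)) (c : String),
    (pvGoB d fuel ls).getD c [] = d.getD c [] ++ pvContent c none ls := by
  induction fuel with
  | zero =>
    intro ls hlen d c
    have : ls = [] := List.eq_nil_of_length_eq_zero (Nat.le_zero.mp hlen)
    subst this
    simp [pvGoB_nil, pvContent, pvBodies]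
  | succ n ih =>
    intro ls hlen d c
    cases ls with
    | nil => simp [pvGoB_nil, pvContent, pvBodies]
    | cons l rest =>
      have hr : rest.length ≤ n := by simpa using hlen
      cases h : pvClassify l with
      | none =>
        rw [pvGoB, h]
        rw [ih rest hr]
        simp [pvContent, pvBodies, h]
      | some name =>
        rw [pvGoB, h]
        rw [ih _ (le_trans (List.length_dropWhile_le _ _) hr)]
        have hsplit : rest = rest.takeWhile (fun x => (pvClassify x).isNone) ++
            rest.dropWhile (fun x => (pvClassify x).isNone) := (List.takeWhile_append_dropWhile).symm
        have htk : ∀ x ∈ rest.takeWhile (fun x => (pvClassify x).isNone), pvClassify x = none := by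
          intro x hx
          simpa [Option.isNone_iff_eq_none] using List.mem_takeWhile_imp hx
        have hdrop : rest.dropWhile (fun x => (pvClassify x).isNone) = [] ∨
            ∃ hd tl, rest.dropWhile (fun x => (pvClassify x).isNone) = hd :: tl ∧
              (pvClassify hd).isSome := by
          cases hdw : rest.dropWhile (fun x => (pvClassify x).isNone) with
          | nil => exact Or.inl rfl
          | cons hd tl =>
            refine Or.inr ⟨hd, tl, rfl, ?_⟩
            have hne : rest.dropWhile (fun x => (pvClassify x).isNone) ≠ [] := by simp [hdw]
            have h2 := List.head_dropWhile_not (fun x => (pvClassify x).isNone) hne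
            simp only [hdw, List.head_cons] at h2
            simpa [Option.isNone_iff_eq_none, Option.isSome_iff_ne_none] using h2
        have hb : pvBodies (none : Option String) (l :: rest) =
            (rest.takeWhile (fun x => (pvClassify x).isNone)).map (fun x => (name, x)) ++
              pvBodies none (rest.dropWhile (fun x => (pvClassify x).isNone)) := by
          simp only [pvBodies, h]
          conv_lhs => rw [hsplit]
          rw [pvBodies_append_none _ _ _ htk]
          rw [pvBodies_heading_head _ (some name) none hdrop]
        rw [PySem.Dict.getD_modify]
        by_cases hc : c = name
        · subst hc
          simp [pvContent, hb, List.filter_append, List.append_assoc, List.filter_map,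
            Function.comp_def]
        · simp [pvContent, hb, hc, Ne.symm hc, List.filter_append, List.filter_map,
            Function.comp_def]

theorem foldA_keys (ls : List String) (d : PySem.Dict String (List String)) (cur : Option String)
    (hk : d.keys = pvK0) (hc : ∀ x, cur = some x → x ∈ pvK0) :
    ((ls.foldl pvStepA (d, cur)).1).keys = pvK0 := by
  induction ls generalizing d cur with
  | nil => simpa using hk
  | cons l ls ih =>
    rw [List.foldl_cons, pvStepA_eq]
    cases h : pvClassify l with
    | some n => exact ih d (some n) hk (by intro x hx; cases hx; exact pvClassify_mem l n h)
    | none =>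
      cases cur with
      | none => exact ih d none hk hc
      | some cc =>
        refine ih _ (some cc) ?_ hc
        have hcon : d.contains cc = true := by
          rw [PySem.Dict.contains_iff_mem_keys, hk]
          exact hc cc rfl
        rw [PySem.Dict.keys_modify, PySem.Dict.keys_insert_of_contains _ _ hcon]
        exact hk

theorem goB_keys (fuel : Nat) : ∀ (ls : List String),
    ∀ (d : PySem.Dict String (List String)), d.keys = pvK0 → (pvGoB d fuel ls).keys = pvK0 := by
  induction fuel with
  | zero =>
    intro ls d hk
    cases ls <;> simpa [pvGoB] using hk
  | succ n ih =>
    intro ls d hk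
    cases ls with
    | nil => simpa [pvGoB_nil] using hk
    | cons l rest =>
      cases h : pvClassify l with
      | none =>
        rw [pvGoB, h]
        exact ih rest d hk
      | some name =>
        rw [pvGoB, h]
        refine ih _ _ ?_
        have hcon : d.contains name = true := by
          rw [PySem.Dict.contains_iff_mem_keys, hk]
          exact pvClassify_mem l name h
        rw [PySem.Dict.keys_modify, PySem.Dict.keys_insert_of_contains _ _ hcon]
        exact hk

-- ===== VERDICT (by name: the statement is the Claim_ definition above) =====
theorem extract_heading_blocks_py_spec : Claim_equal_extract_heading_blocks_py := by
  intro lines _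
  unfold Spec_extract_heading_blocks_py extract_heading_blocks_py extract_heading_blocks_py_alt
  have hK : pvInit.keys = pvK0 := by decide
  have hA := foldA_keys lines pvInit none hK (by simp)
  have hB := goB_keys lines.length lines pvInit hK
  have hnd : pvK0.Nodup := by decide
  rw [PySem.Dict.items_eq_map_keys _ (by rw [hA]; exact hnd) ([] : List String),
      PySem.Dict.items_eq_map_keys _ (by rw [hB]; exact hnd) ([] : List String), hA, hB]
  refine List.map_congr_left ?_
  intro k _
  rw [foldA_getD, goB_getD lines.length lines (Nat.le_refl _)]
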